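-- pv_equiv track=rewrite | github.com/FisherXZ/solar-gen | agent/src/runtime/compactor.py | _merge_summaries
-- ===== SOURCE A (Python) =====
-- def _format_summary(summary: str) -> str:
--     """Convert <summary>...</summary> XML to plain readable text.
--
--     Strips the XML tags and prepends 'Summary:\\n'.
--     Falls back to returning the string as-is if tags aren't present.
--     """
--     if "<summary>" in summary and "</summary>" in summary:
--         start = summary.find("<summary>") + len("<summary>")
--         end = summary.find("</summary>")
--         inner = summary[start:end].strip()
--         return "Summary:\n" + inner
--     return summary.strip()
--
-- def _parse_summary_sections(summary: str) -> tuple[list[str], list[str]]: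
--     """Split a formatted summary into (highlights, timeline) in a single pass.
--
--     Returns a 2-tuple: (non-timeline bullet lines, timeline lines).
--     Calls _format_summary once so callers don't have to.
--     """
--     formatted = _format_summary(summary)
--     highlights: list[str] = []
--     timeline: list[str] = []
--     in_timeline = False
--     for line in formatted.splitlines():
--         stripped = line.rstrip()
--         if stripped == "- Key timeline:":
--             in_timeline = True
--             continue
--         if in_timeline:
--             if not stripped:
--                 break
--             timeline.append(stripped)
--         else:
--             if not stripped or stripped in ("Summary:", "Conversation summary:"):
--                 continue
--             highlights.append(stripped)
--     return highlights, timeline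
--
-- def _merge_summaries(existing: str, new_summary: str) -> str:
--     """Merge a prior compaction summary with a new one.
--
--     Produces a <summary> block with:
--     - "Previously compacted context" (highlights from existing, no timeline)
--     - "Newly compacted context" (highlights from new_summary)
--     - "Key timeline" (timeline from new_summary only)
--     """
--     prev_highlights, _ = _parse_summary_sections(existing)
--     new_highlights, new_timeline = _parse_summary_sections(new_summary)
--
--     lines: list[str] = ["<summary>", "Conversation summary:"]
--     if prev_highlights:
--         lines.append("- Previously compacted context:")
--         lines.extend(f"  {line}" for line in prev_highlights)
--     if new_highlights:
--         lines.append("- Newly compacted context:")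
--         lines.extend(f"  {line}" for line in new_highlights)
--     if new_timeline:
--         lines.append("- Key timeline:")
--         lines.extend(new_timeline)
--     lines.append("</summary>")
--     return "\n".join(lines)
-- ===== SOURCE B (Python) =====
-- def _format_summary(summary: str) -> str:
--     if "<summary>" in summary and "</summary>" in summary:
--         start = summary.find("<summary>") + len("<summary>")
--         end = summary.find("</summary>")
--         return "Summary:\n" + summary[start:end].strip()
--     return summary.strip()
--
--
-- _MARKER = "- Key timeline:"
-- _HEADERS = ("Summary:", "Conversation summary:")
--
--
-- def _parse_summary_sections(summary):
--     # boundary-find-then-slice: rstrip all lines once, locate the marker,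
--     # partition into the pre-marker highlight region and the post-marker tail.
--     lines = [ln.rstrip() for ln in _format_summary(summary).splitlines()]
--     m = lines.index(_MARKER) if _MARKER in lines else len(lines)
--     highlights = [ln for ln in lines[:m] if ln and ln not in _HEADERS]
--     tail = lines[m + 1:]
--     cut = tail.index("") if "" in tail else len(tail)
--     timeline = [ln for ln in tail[:cut] if ln != _MARKER]
--     return highlights, timeline
--
--
-- def _merge_summaries(existing, new_summary):
--     prev_highlights, _ = _parse_summary_sections(existing)
--     new_highlights, new_timeline = _parse_summary_sections(new_summary)
--     lines = (
--         ["<summary>", "Conversation summary:"]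
--         + (["- Previously compacted context:"] + ["  " + ln for ln in prev_highlights]
--            if prev_highlights else [])
--         + (["- Newly compacted context:"] + ["  " + ln for ln in new_highlights]
--            if new_highlights else [])
--         + ([_MARKER] + new_timeline if new_timeline else [])
--         + ["</summary>"]
--     )
--     return "\n".join(lines)
-- ===== Notes on version B (the rewrite author's own statement) =====
-- stated objective: alternative
-- what changed: The stateful single-pass line scan with an in_timeline flag is replaced by a boundary-find-then-slice decomposition: rstrip all lines once, locate the '- Key timeline:' marker index, filter the pre-marker slice for highlights, and cut the post-marker slice at the first blank line for the timeline.
import Mathlib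
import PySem

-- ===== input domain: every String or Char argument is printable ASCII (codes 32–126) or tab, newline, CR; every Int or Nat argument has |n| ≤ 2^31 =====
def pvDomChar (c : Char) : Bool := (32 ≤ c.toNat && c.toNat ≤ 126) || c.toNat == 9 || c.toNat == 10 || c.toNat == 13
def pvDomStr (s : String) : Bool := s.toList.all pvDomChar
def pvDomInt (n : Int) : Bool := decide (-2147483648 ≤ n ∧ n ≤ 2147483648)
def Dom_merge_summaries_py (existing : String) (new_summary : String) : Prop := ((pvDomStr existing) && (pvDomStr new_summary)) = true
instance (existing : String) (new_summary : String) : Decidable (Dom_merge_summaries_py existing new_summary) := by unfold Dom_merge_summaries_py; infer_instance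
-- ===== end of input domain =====

-- B replaces A's stateful single-pass line scan by a boundary-find-then-slice decomposition
-- (locate the '- Key timeline:' marker index, then filter/slice the two regions); same output, similar cost.

-- shared constants / helper: _format_summary is textually identical in Source A and Source B
def pvMarker : List Char := "- Key timeline:".toList
def pvHdrSum : List Char := "Summary:".toList
def pvHdrConv : List Char := "Conversation summary:".toList

-- _format_summary (both versions): tag extraction with strip, else strip the whole string
def pvFmt (summary : String) : List Char :=
  let cs := summary.toList
  if PySem.Chars.isIn "<summary>".toList cs && PySem.Chars.isIn "</summary>".toList cs then
    let start : Int := PySem.Chars.find cs "<summary>".toList + 9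
    let stop : Int := PySem.Chars.find cs "</summary>".toList
    "Summary:\n".toList ++ PySem.Chars.strip (PySem.Chars.slice cs (some start) (some stop))
  else
    PySem.Chars.strip cs

-- ===== PORT A =====
-- A's single-pass scan with the in_timeline flag; break = return the accumulators
def pvScanA (lines : List (List Char)) (inTl : Bool)
    (hs ts : List (List Char)) : List (List Char) × List (List Char) :=
  match lines with
  | [] => (hs, ts)
  | line :: rest =>
    let s := PySem.Chars.rstrip line
    if s = pvMarker then pvScanA rest true hs ts
    else if inTl then
      if s = [] then (hs, ts)
      else pvScanA rest true hs (ts ++ [s])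
    else
      if s = [] ∨ s = pvHdrSum ∨ s = pvHdrConv then pvScanA rest inTl hs ts
      else pvScanA rest inTl (hs ++ [s]) ts

def pvParseA (summary : String) : List (List Char) × List (List Char) :=
  pvScanA (PySem.Chars.splitlines (pvFmt summary)) false [] []

def merge_summaries_py (existing : String) (new_summary : String) : String :=
  let p := pvParseA existing
  let q := pvParseA new_summary
  let prevH := p.1
  let newH := q.1
  let newT := q.2
  let lines : List (List Char) := ["<summary>".toList, pvHdrConv]
  let lines := if prevH ≠ [] then
      lines ++ ["- Previously compacted context:".toList] ++ prevH.map (fun l => "  ".toList ++ l)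
    else lines
  let lines := if newH ≠ [] then
      lines ++ ["- Newly compacted context:".toList] ++ newH.map (fun l => "  ".toList ++ l)
    else lines
  let lines := if newT ≠ [] then lines ++ [pvMarker] ++ newT else lines
  let lines := lines ++ ["</summary>".toList]
  String.ofList (PySem.Chars.join ['\n'] lines)

-- ===== PORT B =====
-- Source B's parser: rstrip all lines, find the marker index, slice the two regions and filter.
-- lines[:m] / lines[m+1:] with 0 ≤ m ≤ len(lines) are exactly List.take m / List.drop (m+1).
def pvParseB (summary : String) : List (List Char) × List (List Char) :=
  let lines := (PySem.Chars.splitlines (pvFmt summary)).map PySem.Chars.rstrip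
  let m := (PySem.List.index? lines pvMarker).getD lines.length
  let highlights := (lines.take m).filter
      (fun l => decide (l ≠ [] ∧ l ≠ pvHdrSum ∧ l ≠ pvHdrConv))
  let tail := lines.drop (m + 1)
  let cut := (PySem.List.index? tail ([] : List Char)).getD tail.length
  let timeline := (tail.take cut).filter (fun l => decide (l ≠ pvMarker))
  (highlights, timeline)

def merge_summaries_py_alt (existing : String) (new_summary : String) : String :=
  let p := pvParseB existing
  let q := pvParseB new_summary
  let lines : List (List Char) :=
    ["<summary>".toList, pvHdrConv]
    ++ (if p.1 ≠ [] then "- Previously compacted context:".toList :: p.1.map (fun l => "  ".toList ++ l) else [])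
    ++ (if q.1 ≠ [] then "- Newly compacted context:".toList :: q.1.map (fun l => "  ".toList ++ l) else [])
    ++ (if q.2 ≠ [] then pvMarker :: q.2 else [])
    ++ ["</summary>".toList]
  String.ofList (PySem.Chars.join ['\n'] lines)

-- ===== PRECONDITION & SPEC =====
def Spec_merge_summaries_py (existing : String) (new_summary : String) (out : String) : Prop := out = merge_summaries_py_alt existing new_summary
instance (existing : String) (new_summary : String) (out : String) : Decidable (Spec_merge_summaries_py existing new_summary out) := by unfold Spec_merge_summaries_py; infer_instance

-- ===== CLAIM (what is proved, stated in full; the proofs are below) =====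
def Claim_equal_merge_summaries_py : Prop := ∀ (existing : String) (new_summary : String), Dom_merge_summaries_py existing new_summary → Spec_merge_summaries_py existing new_summary (merge_summaries_py existing new_summary)

-- ===== LEMMAS AND PROOFS =====

-- B's timeline of a tail region: take to the first blank line, drop repeated markers
def pvTl (ls : List (List Char)) : List (List Char) :=
  (ls.take ((PySem.List.index? ls ([] : List Char)).getD ls.length)).filter
    (fun l => decide (l ≠ pvMarker))

-- B's marker index
def pvM (ls : List (List Char)) : Nat :=
  (PySem.List.index? ls pvMarker).getD ls.length

-- B's highlights of the whole (already rstripped) line list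
def pvHl (ls : List (List Char)) : List (List Char) :=
  (ls.take (pvM ls)).filter (fun l => decide (l ≠ [] ∧ l ≠ pvHdrSum ∧ l ≠ pvHdrConv))

lemma pvScanA_true (lines : List (List Char)) (hs ts : List (List Char)) :
    pvScanA lines true hs ts = (hs, ts ++ pvTl (lines.map PySem.Chars.rstrip)) := by
  induction lines generalizing ts with
  | nil => simp [pvScanA, pvTl]
  | cons line rest ih =>
    simp only [pvScanA, List.map_cons]
    by_cases hm : PySem.Chars.rstrip line = pvMarker
    · rw [if_pos hm, ih, hm]
      unfold pvTl
      rw [PySem.List.index?_cons_of_ne _ (by decide : pvMarker ≠ ([] : List Char))]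
      cases h : PySem.List.index? (rest.map PySem.Chars.rstrip) ([] : List Char) with
        | none => simp
        | some k => simp
    · rw [if_neg hm, if_pos trivial]
      by_cases hb : PySem.Chars.rstrip line = ([] : List Char)
      · rw [if_pos hb, hb]
        unfold pvTl
        rw [PySem.List.index?_cons_self]
        simp
      · rw [if_neg hb, ih]
        unfold pvTl
        rw [PySem.List.index?_cons_of_ne _ hb]
        cases h : PySem.List.index? (rest.map PySem.Chars.rstrip) ([] : List Char) with
          | none => simp [hm]
          | some k => simp [hm]

lemma pvScanA_false (lines : List (List Char)) (hs ts : List (List Char)) :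
    pvScanA lines false hs ts =
      (hs ++ pvHl (lines.map PySem.Chars.rstrip),
       ts ++ pvTl ((lines.map PySem.Chars.rstrip).drop (pvM (lines.map PySem.Chars.rstrip) + 1))) := by
  induction lines generalizing hs ts with
  | nil => simp [pvScanA, pvHl, pvTl, pvM]
  | cons line rest ih =>
    simp only [pvScanA, List.map_cons]
    by_cases hm : PySem.Chars.rstrip line = pvMarker
    · rw [if_pos hm, pvScanA_true, hm]
      have hM : pvM (pvMarker :: rest.map PySem.Chars.rstrip) = 0 := by
        unfold pvM; rw [PySem.List.index?_cons_self]; rfl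
      rw [hM]
      unfold pvHl
      rw [hM]
      simp
    · rw [if_neg hm]
      have hM : pvM (PySem.Chars.rstrip line :: rest.map PySem.Chars.rstrip)
          = pvM (rest.map PySem.Chars.rstrip) + 1 := by
        unfold pvM
        rw [PySem.List.index?_cons_of_ne _ hm]
        cases h : PySem.List.index? (rest.map PySem.Chars.rstrip) pvMarker with
          | none => simp
          | some k => simp
      by_cases hb : PySem.Chars.rstrip line = ([] : List Char) ∨
          PySem.Chars.rstrip line = pvHdrSum ∨ PySem.Chars.rstrip line = pvHdrConv
      · rw [if_pos hb, ih]
        unfold pvHl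
        rw [hM]
        simp only [List.take_succ_cons, List.drop_succ_cons, List.filter_cons]
        have : ¬ (PySem.Chars.rstrip line ≠ ([] : List Char) ∧
            PySem.Chars.rstrip line ≠ pvHdrSum ∧ PySem.Chars.rstrip line ≠ pvHdrConv) := by
          tauto
        simp [this]
      · rw [if_neg hb, ih]
        unfold pvHl
        rw [hM]
        push Not at hb
        simp only [List.take_succ_cons, List.drop_succ_cons, List.filter_cons]
        simp [hb.1, hb.2.1, hb.2.2]

lemma pvParse_eq (s : String) : pvParseA s = pvParseB s := by
  unfold pvParseA pvParseB
  rw [pvScanA_false]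
  simp only [pvTl, pvHl, pvM]
  rfl

-- ===== VERDICT (by name: the statement is the Claim_ definition above) =====
theorem merge_summaries_py_spec : Claim_equal_merge_summaries_py := by
  intro existing new_summary _
  unfold Spec_merge_summaries_py
  simp only [merge_summaries_py, merge_summaries_py_alt, pvParse_eq existing,
    pvParse_eq new_summary]
  split_ifs <;> simp [List.append_assoc]
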